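-- pv_equiv track=rewrite | github.com/roksechs/sheet-call-tree | src/sheet_call_tree/labeler.py | _find_headers_before
-- ===== SOURCE A (Python) =====
-- import bisect
--
-- def _find_headers_before(
--     sorted_headers: list[tuple[int, str]],
--     position: int,
--     top_k: int,
-- ) -> list[str]:
--     """Find up to top_k unique header texts before `position`, nearest first.
--
--     sorted_headers is a list of (pos, text) sorted by pos ascending.
--     We want entries where pos < position, in reverse order (nearest first).
--     """
--     if not sorted_headers:
--         return []
--
--     # Binary search for insertion point of `position`
--     idx = bisect.bisect_left(sorted_headers, (position,))
--
--     results: list[str] = []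
--     seen: set[str] = set()
--     for i in range(idx - 1, -1, -1):
--         if len(results) >= top_k:
--             break
--         text = sorted_headers[i][1]
--         if text not in seen:
--             seen.add(text)
--             results.append(text)
--
--     return results
-- ===== SOURCE B (Python) =====
-- def _find_headers_before(sorted_headers, position, top_k):
--     results = []
--     seen = set()
--     for pos, text in reversed(sorted_headers):
--         if len(results) >= top_k:
--             break
--         if pos < position and text not in seen:
--             seen.add(text)
--             results.append(text)
--     return results
-- ===== Notes on version B (the rewrite author's own statement) =====
-- stated objective: simpler
-- what changed: Replaces the bisect binary search plus index-countdown loop with a single linear scan over reversed(sorted_headers) that filters entries with pos < position; Pre_ excludes lists that are not partitioned around position (an entry with pos >= position before one with pos < position), which violate the documented sorted-by-pos contract and make bisect's index accidental.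
-- outside the precondition, e.g. on _find_headers_before([(5, 'a'), (1, 'b')], 3, 2): A returns ['b', 'a'], B returns ['b']
import Mathlib
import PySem

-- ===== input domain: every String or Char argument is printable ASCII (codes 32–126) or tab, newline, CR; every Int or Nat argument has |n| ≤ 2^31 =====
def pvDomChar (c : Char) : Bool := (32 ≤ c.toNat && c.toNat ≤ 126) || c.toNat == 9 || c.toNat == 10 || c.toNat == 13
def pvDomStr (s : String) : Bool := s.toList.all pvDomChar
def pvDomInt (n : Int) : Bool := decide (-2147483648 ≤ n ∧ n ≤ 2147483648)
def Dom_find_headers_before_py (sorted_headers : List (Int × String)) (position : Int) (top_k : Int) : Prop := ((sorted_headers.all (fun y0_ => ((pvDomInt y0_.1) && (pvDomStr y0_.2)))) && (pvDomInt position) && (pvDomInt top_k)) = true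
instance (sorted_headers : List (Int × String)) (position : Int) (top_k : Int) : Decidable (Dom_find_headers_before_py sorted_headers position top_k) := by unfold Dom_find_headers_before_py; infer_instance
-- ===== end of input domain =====

-- B replaces A's bisect binary search + index countdown with one linear scan over the
-- reversed list filtering entries with pos < position (objective: simpler, not faster).


-- ===== PORT A =====
-- Python's `bisect.bisect_left(sorted_headers, (position,))` compares 2-tuples with the 1-tuple
-- key; (p, t) < (position,) holds iff p < position (with equal first components the shorter tuple
-- is smaller), so the search makes exactly the comparisons of `bisectLeft (xs.map Prod.fst) position`
-- (same indices, same outcomes). The `break` is ported as the loop keeping its state unchanged once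
-- `len(results) >= top_k` (that condition stays true, so the remaining iterations are no-ops).
def find_headers_before_py (sorted_headers : List (Int × String)) (position : Int) (top_k : Int) : List String :=
  if sorted_headers = [] then []
  else
    let idx : Nat := PySem.List.bisectLeft (sorted_headers.map Prod.fst) position
    ((PySem.List.pyRange ((idx : Int) - 1) (-1) (-1)).foldl
      (fun (st : List String × PySem.Set String) i =>
        if (st.1.length : Int) ≥ top_k then st
        else
          let text := (PySem.List.pyGetD sorted_headers i ((0 : Int), "")).2
          if st.2.contains text then st
          else (st.1 ++ [text], st.2.add text))
      (([] : List String), (PySem.Set.empty : PySem.Set String))).1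

-- ===== PORT B =====
-- B's single loop over reversed(sorted_headers): break when full, take fresh texts with pos < position.
def pvBLoop (position top_k : Int) : List (Int × String) → List String → PySem.Set String → List String
  | [], results, _ => results
  | (pos, text) :: rest, results, seen =>
    if (results.length : Int) ≥ top_k then results
    else if pos < position ∧ ¬ seen.contains text then
      pvBLoop position top_k rest (results ++ [text]) (seen.add text)
    else pvBLoop position top_k rest results seen

def find_headers_before_py_alt (sorted_headers : List (Int × String)) (position : Int) (top_k : Int) : List String :=
  pvBLoop position top_k sorted_headers.reverse [] PySem.Set.empty

-- ===== PRECONDITION & SPEC =====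
-- Pre_ excludes lists that are not partitioned around `position` (an entry with pos ≥ position
-- occurring before an entry with pos < position): such inputs violate the function's documented
-- 'sorted by pos ascending' contract, and the index bisect returns on them is accidental.
def Pre_find_headers_before_py (sorted_headers : List (Int × String)) (position : Int) (top_k : Int) : Prop :=
  List.Pairwise (fun a b => b.1 < position → a.1 < position) sorted_headers
instance (sorted_headers : List (Int × String)) (position : Int) (top_k : Int) : Decidable (Pre_find_headers_before_py sorted_headers position top_k) := by unfold Pre_find_headers_before_py; infer_instance

def pvWitness_find_headers_before_py : (List (Int × String)) × Int × Int := ([(1, "a"), (2, "b")], 2, 1)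

def Spec_find_headers_before_py (sorted_headers : List (Int × String)) (position : Int) (top_k : Int) (out : List String) : Prop := out = find_headers_before_py_alt sorted_headers position top_k
instance (sorted_headers : List (Int × String)) (position : Int) (top_k : Int) (out : List String) : Decidable (Spec_find_headers_before_py sorted_headers position top_k out) := by unfold Spec_find_headers_before_py; infer_instance

-- ===== CLAIM (what is proved, stated in full; the proofs are below) =====
def Claim_equal_find_headers_before_py : Prop := ∀ (sorted_headers : List (Int × String)) (position : Int) (top_k : Int), Dom_find_headers_before_py sorted_headers position top_k → Pre_find_headers_before_py sorted_headers position top_k → Spec_find_headers_before_py sorted_headers position top_k (find_headers_before_py sorted_headers position top_k)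

-- ===== LEMMAS AND PROOFS =====

-- The dedup step both loops perform, on the pair state (results, seen).
def pvStep (top_k : Int) (st : List String × PySem.Set String) (e : Int × String) : List String × PySem.Set String :=
  if (st.1.length : Int) ≥ top_k then st
  else if st.2.contains e.2 then st
  else (st.1 ++ [e.2], st.2.add e.2)

-- The binary-search loop on a list partitioned at index k returns k.
theorem pv_bisectLoop_eq (ls : List Int) (x : Int) (k : Nat)
    (hlt : ∀ i (h : i < ls.length), i < k → ls[i] < x)
    (hge : ∀ i (h : i < ls.length), k ≤ i → x ≤ ls[i]) :
    ∀ (fuel lo hi : Nat), lo ≤ k → k ≤ hi → hi ≤ ls.length → hi - lo ≤ fuel →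
    PySem.List.bisectLeftLoop ls x fuel lo hi = k := by
  intro fuel
  induction fuel with
  | zero =>
    intro lo hi h1 h2 h3 h4
    simp only [PySem.List.bisectLeftLoop]
    omega
  | succ fuel ih =>
    intro lo hi h1 h2 h3 h4
    by_cases hlh : lo < hi
    · have hmid : (lo + hi) / 2 < ls.length := by omega
      simp only [PySem.List.bisectLeftLoop, if_pos hlh, List.getElem?_eq_getElem hmid]
      by_cases hc : ls[(lo + hi) / 2] < x
      · rw [if_pos hc]
        have : (lo + hi) / 2 < k := by
          by_contra hk
          exact absurd hc (by have := hge _ hmid (by omega); omega)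
        exact ih _ _ (by omega) h2 h3 (by omega)
      · rw [if_neg hc]
        have : k ≤ (lo + hi) / 2 := by
          by_contra hk
          exact hc (hlt _ hmid (by omega))
        exact ih _ _ h1 this (by omega) (by omega)
    · simp only [PySem.List.bisectLeftLoop, if_neg hlh]
      omega

theorem pv_bisect_eq (ls : List Int) (x : Int) (k : Nat) (hk : k ≤ ls.length)
    (hlt : ∀ i (h : i < ls.length), i < k → ls[i] < x)
    (hge : ∀ i (h : i < ls.length), k ≤ i → x ≤ ls[i]) :
    PySem.List.bisectLeft ls x = k := by
  unfold PySem.List.bisectLeft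
  exact pv_bisectLoop_eq ls x k hlt hge _ _ _ (by omega) hk le_rfl (by omega)

-- range(0, k) indexed into xs is the k-prefix of xs.
theorem pv_map_pyGetD_range (xs : List (Int × String)) (k : Nat) (hk : k ≤ xs.length) :
    (PySem.List.pyRange 0 (k : Int)).map (fun j => PySem.List.pyGetD xs j ((0 : Int), "")) = xs.take k := by
  induction k with
  | zero => simp
  | succ n ih =>
    have h1 : ((n : Int) + 1) = ((n + 1 : Nat) : Int) := by push_cast; ring
    rw [← h1, PySem.List.pyRange_one_succ_right (by positivity), List.map_append]
    rw [ih (by omega)]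
    have hn : n < xs.length := by omega
    rw [List.take_add_one]
    simp [PySem.List.pyGetD_natCast, List.getD, List.getElem?_eq_getElem hn]

-- A full result absorbs further pvStep iterations.
theorem pv_foldl_full (top_k : Int) (l : List (Int × String)) (res : List String) (seen : PySem.Set String)
    (h : (res.length : Int) ≥ top_k) : l.foldl (pvStep top_k) (res, seen) = (res, seen) := by
  induction l with
  | nil => rfl
  | cons e rest ih => simp [pvStep, h, ih]

-- A full result stops pvBLoop immediately.
theorem pv_bloop_full (position top_k : Int) (l : List (Int × String)) (res : List String) (seen : PySem.Set String)
    (h : (res.length : Int) ≥ top_k) : pvBLoop position top_k l res seen = res := by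
  cases l with
  | nil => rfl
  | cons e rest => cases e with | mk p t => simp [pvBLoop, h]

-- pvBLoop skips a block of entries at or after `position`.
theorem pv_bloop_skip (position top_k : Int) (ys zs : List (Int × String)) (res : List String) (seen : PySem.Set String)
    (h : ∀ e ∈ ys, position ≤ e.1) :
    pvBLoop position top_k (ys ++ zs) res seen = pvBLoop position top_k zs res seen := by
  induction ys with
  | nil => rfl
  | cons e rest ih =>
    cases e with | mk p t =>
    by_cases hf : (res.length : Int) ≥ top_k
    · rw [pv_bloop_full _ _ _ _ _ hf, pv_bloop_full _ _ _ _ _ hf]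
    · have hp : position ≤ p := h (p, t) (by simp)
      simp only [List.cons_append, pvBLoop, if_neg hf]
      rw [if_neg (by omega), ih (fun e he => h e (by simp [he]))]

-- On entries strictly before `position`, pvBLoop is the fold of pvStep.
theorem pv_bloop_fold (position top_k : Int) (l : List (Int × String)) (res : List String) (seen : PySem.Set String)
    (h : ∀ e ∈ l, e.1 < position) :
    pvBLoop position top_k l res seen = (l.foldl (pvStep top_k) (res, seen)).1 := by
  induction l generalizing res seen with
  | nil => rfl
  | cons e rest ih =>
    cases e with | mk p t =>
    have hp : p < position := h (p, t) (by simp)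
    by_cases hf : (res.length : Int) ≥ top_k
    · rw [pv_bloop_full _ _ _ _ _ hf, List.foldl_cons]
      simp only [pvStep, if_pos hf]
      rw [pv_foldl_full _ _ _ _ hf]
    · by_cases hc : seen.contains t
      · simp only [pvBLoop, if_neg hf, List.foldl_cons, pvStep]
        rw [if_neg (fun hco => hco.2 hc), ih _ _ (fun e he => h e (by simp [he]))]
        rw [if_pos hc]
      · simp only [pvBLoop, if_neg hf, List.foldl_cons, pvStep]
        rw [if_pos (by exact ⟨hp, hc⟩), ih _ _ (fun e he => h e (by simp [he]))]
        rw [if_neg (by simpa using hc)]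

-- Main equivalence: on a list partitioned around `position`, bisect's index is the partition
-- point, A's countdown walks the reversed prefix, and B's reverse scan skips the suffix and
-- walks the same reversed prefix with the same dedup step.
theorem pv_main (xs : List (Int × String)) (position top_k : Int)
    (hpre : List.Pairwise (fun a b => b.1 < position → a.1 < position) xs) :
    find_headers_before_py xs position top_k = find_headers_before_py_alt xs position top_k := by
  by_cases hx : xs = []
  · subst hx; simp [find_headers_before_py, find_headers_before_py_alt, pvBLoop]
  · set k := List.findIdx (fun e => decide (position ≤ e.1)) xs with hkdef
    have hkle : k ≤ xs.length := List.findIdx_le_length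
    have hlt' : ∀ i (h : i < xs.length), i < k → xs[i].1 < position := by
      intro i h hik
      have := List.not_of_lt_findIdx (p := fun e => decide (position ≤ e.1)) (xs := xs) (i := i) hik
      simp at this; omega
    have hge' : ∀ i (h : i < xs.length), k ≤ i → position ≤ xs[i].1 := by
      intro i h hki
      have hklen : k < xs.length := by omega
      have hpk : position ≤ xs[k].1 := by
        have := List.findIdx_getElem (p := fun e => decide (position ≤ e.1)) (xs := xs) (w := hklen)
        simpa using this
      rcases Nat.eq_or_lt_of_le hki with heq | hlt2
      · simpa [← heq] using hpk
      · by_contra hcon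
        have := (List.pairwise_iff_getElem.mp hpre) k i hklen h hlt2 (by omega)
        omega
    have hbis : PySem.List.bisectLeft (xs.map Prod.fst) position = k := by
      apply pv_bisect_eq _ _ _ (by simpa using hkle)
      · intro i h hik
        rw [List.getElem_map]
        exact hlt' i (by simpa using h) hik
      · intro i h hki
        rw [List.getElem_map]
        exact hge' i (by simpa using h) hki
    have hA : find_headers_before_py xs position top_k
        = ((xs.take k).reverse.foldl (pvStep top_k) (([] : List String), (PySem.Set.empty : PySem.Set String))).1 := by
      rw [find_headers_before_py, if_neg hx]
      simp only [hbis]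
      have hrange : PySem.List.pyRange ((k : Int) - 1) (-1) (-1) = (PySem.List.pyRange 0 (k : Int)).reverse := by
        rw [PySem.List.pyRange_neg_one_eq_reverse]
        norm_num
      rw [hrange]
      have hfold : ∀ (L : List Int) (init : List String × PySem.Set String),
          L.foldl (fun st i =>
            if (st.1.length : Int) ≥ top_k then st
            else
              let text := (PySem.List.pyGetD xs i ((0 : Int), "")).2
              if st.2.contains text then st
              else (st.1 ++ [text], st.2.add text)) init
          = (L.map (fun j => PySem.List.pyGetD xs j ((0 : Int), ""))).foldl (pvStep top_k) init := by
        intro L init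
        rw [List.foldl_map]
        rfl
      rw [hfold, List.map_reverse, pv_map_pyGetD_range _ _ hkle]
    have hB : find_headers_before_py_alt xs position top_k
        = ((xs.take k).reverse.foldl (pvStep top_k) (([] : List String), (PySem.Set.empty : PySem.Set String))).1 := by
      rw [find_headers_before_py_alt]
      have hsplit : xs.reverse = (xs.drop k).reverse ++ (xs.take k).reverse := by
        rw [← List.reverse_append, List.take_append_drop]
      rw [hsplit, pv_bloop_skip, pv_bloop_fold]
      · intro e he
        rw [List.mem_reverse, List.mem_take_iff_getElem] at he
        obtain ⟨i, hi, rfl⟩ := he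
        exact hlt' i _ (by omega)
      · intro e he
        rw [List.mem_reverse] at he
        obtain ⟨i, hi, rfl⟩ := List.mem_iff_getElem.mp he
        rw [List.getElem_drop]
        exact hge' _ _ (by omega)
    rw [hA, hB]

-- ===== VERDICT (by name: the statement is the Claim_ definition above) =====
theorem find_headers_before_py_spec : Claim_equal_find_headers_before_py := by
  intro sorted_headers position top_k _hdom hpre
  exact pv_main sorted_headers position top_k hpre
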